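-- pv_equiv track=rewrite | github.com/pypi-data/pypi-mirror-144 | packages/convert-ascii/convert_ascii-1.0.3.tar.gz/convert_ascii-1.0.3/convert_ascii/convert.py | converte_para_decimal
-- ===== SOURCE A (Python) =====
-- Alphabeto_Ma= ['A','B','C','D','E','F','G','H','I','J','K','L','M','N','O','P','Q','R','S','T','U','V','W','X','Y','Z']
--
-- Equivalente_ascii_ma=['65','66','67','68','69','70','71','72','73','74','75','76','77','78','79','80','81','82','83','84','85','86','87','88','89','90']
--
-- Alphabeto_Min= ['a','b','c','d','e','f','g','h','i','j','k','l','m','n','o','p','q','r','s','t','u','v','w','x','y','z']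
--
-- Equivalente_ascii_min=['97','98','99','100','101','102','103','104','105','106','107','108','109','110','111','112','113','114','115','116','117','118','119','120','121','122']
--
-- def converte_para_decimal(parametro):
--     j=0
--     if((parametro).isupper()):
--         for i in Alphabeto_Ma:
--             if str(parametro) == Alphabeto_Ma[j]:
--                 return Equivalente_ascii_ma[j]
--             j=j+1
--     else:
--         for i in Alphabeto_Min:
--             if parametro == Alphabeto_Min[j]:
--                 return Equivalente_ascii_min[j]
--             j=j+1
-- ===== SOURCE B (Python) =====
-- def converte_para_decimal(parametro):
--     # closed form: single ASCII letter -> its decimal code as a string, else None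
--     if len(parametro) == 1 and ('A' <= parametro <= 'Z' or 'a' <= parametro <= 'z'):
--         return str(ord(parametro))
--     return None
-- ===== Notes on version B (the rewrite author's own statement) =====
-- stated objective: simpler
-- what changed: Replaces the two 26-entry parallel lookup tables and the indexed linear scan (plus the isupper branch selector) with a single closed-form guard: one length-1 check, a direct 'A'<=s<='Z' / 'a'<=s<='z' range comparison and str(ord(s)).
import Mathlib
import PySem

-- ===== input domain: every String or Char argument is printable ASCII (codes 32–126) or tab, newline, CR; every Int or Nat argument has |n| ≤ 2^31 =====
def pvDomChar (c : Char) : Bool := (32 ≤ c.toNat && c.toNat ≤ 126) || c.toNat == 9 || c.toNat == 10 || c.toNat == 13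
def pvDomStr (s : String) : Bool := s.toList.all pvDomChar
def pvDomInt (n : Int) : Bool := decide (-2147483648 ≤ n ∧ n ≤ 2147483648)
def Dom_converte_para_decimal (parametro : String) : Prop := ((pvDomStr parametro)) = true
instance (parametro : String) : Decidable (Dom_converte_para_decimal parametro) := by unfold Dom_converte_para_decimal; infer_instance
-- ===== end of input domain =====

-- B replaces A's two parallel 26-entry lookup tables and indexed scan by a single
-- closed-form guard (length-1 + letter-range check) and str(ord(c)): simpler, same results.

-- ===== PORT A =====
def Alphabeto_Ma : List String := ["A","B","C","D","E","F","G","H","I","J","K","L","M","N","O","P","Q","R","S","T","U","V","W","X","Y","Z"]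
def Equivalente_ascii_ma : List String := ["65","66","67","68","69","70","71","72","73","74","75","76","77","78","79","80","81","82","83","84","85","86","87","88","89","90"]
def Alphabeto_Min : List String := ["a","b","c","d","e","f","g","h","i","j","k","l","m","n","o","p","q","r","s","t","u","v","w","x","y","z"]
def Equivalente_ascii_min : List String := ["97","98","99","100","101","102","103","104","105","106","107","108","109","110","111","112","113","114","115","116","117","118","119","120","121","122"]

-- Python str.isupper(), exact on the ASCII domain: at least one cased (= letter)
-- character and no lowercase one.
def pyStrIsupper (s : String) : Bool :=
  (!(s.toList.any PySem.Chars.islower)) && s.toList.any PySem.Chars.isupper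

-- A's for-loop with running index j over the two parallel tables: compare the
-- parameter with the j-th alphabet entry, return the j-th ascii entry on a match.
def pyScanTables (parametro : String) : List String → List String → Option String
  | a :: as, e :: es => if parametro == a then some e else pyScanTables parametro as es
  | _, _ => none

def converte_para_decimal (parametro : String) : Option String :=
  if pyStrIsupper parametro then
    pyScanTables parametro Alphabeto_Ma Equivalente_ascii_ma
  else
    pyScanTables parametro Alphabeto_Min Equivalente_ascii_min

-- ===== PORT B =====
-- ord(s) for a length-1 string (none otherwise; B only calls it after the length guard)
def pyOrd? (s : String) : Option Int :=
  match s.toList with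
  | [c] => some (c.toNat : Int)
  | _ => none

-- Python string ≤ is code-point lexicographic = Lean's order on toList (PySem doc)
def pyStrLe (s t : String) : Bool := !(decide (t.toList < s.toList))

def converte_para_decimal_alt (parametro : String) : Option String :=
  if parametro.toList.length == 1 &&
      ((pyStrLe "A" parametro && pyStrLe parametro "Z") ||
       (pyStrLe "a" parametro && pyStrLe parametro "z")) then
    (pyOrd? parametro).map PySem.Int.toStr
  else
    none

-- ===== PRECONDITION & SPEC =====
def Spec_converte_para_decimal (parametro : String) (out : Option String) : Prop := out = converte_para_decimal_alt parametro
instance (parametro : String) (out : Option String) : Decidable (Spec_converte_para_decimal parametro out) := by unfold Spec_converte_para_decimal; infer_instance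

-- ===== CLAIM (what is proved, stated in full; the proofs are below) =====
def Claim_equal_converte_para_decimal : Prop := ∀ (parametro : String), Dom_converte_para_decimal parametro → Spec_converte_para_decimal parametro (converte_para_decimal parametro)

-- ===== LEMMAS AND PROOFS =====

-- the single-character case, checked for every character code ≤ 126
lemma single_char_case (n : Fin 127) :
    converte_para_decimal (String.ofList [Char.ofNat n.val]) =
      converte_para_decimal_alt (String.ofList [Char.ofNat n.val]) := by
  revert n; decide

-- the scan returns none when the parameter differs from every table entry
lemma pyScanTables_none (s : String) (alpha ascii : List String)
    (h : ∀ a ∈ alpha, s ≠ a) : pyScanTables s alpha ascii = none := by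
  induction alpha generalizing ascii with
  | nil => cases ascii <;> rfl
  | cons a as ih =>
    cases ascii with
    | nil => rfl
    | cons e es =>
      simp only [pyScanTables]
      rw [if_neg (by simpa using h a (by simp))]
      exact ih es (fun a' ha' => h a' (by simp [ha']))

-- both programs return none on any string whose length is not 1
lemma both_none (s : String) (hlen : s.toList.length ≠ 1) :
    converte_para_decimal s = converte_para_decimal_alt s := by
  have hne : ∀ t : String, t.toList.length = 1 → s ≠ t := by
    intro t ht heq; exact hlen (heq ▸ ht)
  have hA : ∀ a ∈ Alphabeto_Ma, s ≠ a := by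
    intro a ha; refine hne a ?_
    fin_cases ha <;> decide
  have hMin : ∀ a ∈ Alphabeto_Min, s ≠ a := by
    intro a ha; refine hne a ?_
    fin_cases ha <;> decide
  have hB : converte_para_decimal_alt s = none := by
    unfold converte_para_decimal_alt
    rw [if_neg]
    simp only [Bool.and_eq_true, beq_iff_eq]
    intro h; exact hlen h.1
  rw [hB]
  unfold converte_para_decimal
  split
  · exact pyScanTables_none s _ _ hA
  · exact pyScanTables_none s _ _ hMin

theorem converte_para_decimal_spec : Claim_equal_converte_para_decimal := by
  intro s hdom
  unfold Spec_converte_para_decimal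
  match hcs : s.toList with
  | [] => exact both_none s (by rw [hcs]; simp)
  | c :: d :: rest => exact both_none s (by rw [hcs]; simp)
  | [c] =>
    have hall : s.toList.all pvDomChar = true := hdom
    have hc : pvDomChar c = true := by rw [hcs] at hall; simpa using hall
    have hle : c.toNat < 127 := by
      simp only [pvDomChar, Bool.or_eq_true, Bool.and_eq_true, decide_eq_true_eq,
        beq_iff_eq] at hc
      omega
    have hofs : String.ofList [Char.ofNat c.toNat] = s := by
      rw [Char.ofNat_toNat, ← hcs, String.ofList_toList]
    have h2 : converte_para_decimal (String.ofList [Char.ofNat c.toNat]) =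
        converte_para_decimal_alt (String.ofList [Char.ofNat c.toNat]) :=
      single_char_case ⟨c.toNat, hle⟩
    rw [hofs] at h2
    exact h2
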